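-- pv_equiv track=rewrite | github.com/NativeSummary/experiment | baseline-native_summary/coverage_scatter.py | calc_func_coverage_jucify
-- ===== SOURCE A (Python) =====
-- def calc_func_coverage_jucify(cov, func_map, is_32):
--     covered_func = set()
--     for addr in cov:
--         f = get_func(func_map, addr, is_32)
--         if f is None:
--             continue
--         covered_func.add(f)
--     return len(covered_func)
--
-- GHIDRA_BASE_32 = 0x10000
--
-- GHIDRA_BASE_64 = 0x100000
--
-- ANGR_BASE = 0x400000
--
-- def get_func(func_map, addr, is_32):
--     adjusted_addr = addr - ANGR_BASE
--     if is_32: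
--         adjusted_addr += GHIDRA_BASE_32
--     else:
--         adjusted_addr += GHIDRA_BASE_64
--     for func_entry, body_range in func_map.items():
--         low, high = body_range[0]
--         if adjusted_addr > low and adjusted_addr < high:
--             return func_entry
-- ===== SOURCE B (Python) =====
-- GHIDRA_BASE_32 = 0x10000
-- GHIDRA_BASE_64 = 0x100000
-- ANGR_BASE = 0x400000
--
-- def calc_func_coverage_jucify(cov, func_map, is_32):
--     # Entry-outer sweep: dedupe adjusted addresses once, then walk the function
--     # map a single time, claiming each still-unclaimed address for the first
--     # entry whose body range contains it; count entries that claim something.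
--     base = GHIDRA_BASE_32 if is_32 else GHIDRA_BASE_64
--     remaining = {addr - ANGR_BASE + base for addr in cov}
--     count = 0
--     for body_range in func_map.values():
--         low, high = body_range[0]
--         hit = {a for a in remaining if low < a < high}
--         if hit:
--             count += 1
--             remaining -= hit
--             if not remaining:
--                 break
--     return count
-- ===== Notes on version B (the rewrite author's own statement) =====
-- stated objective: alternative
-- what changed: A loops over addresses, rescanning the whole func_map per address and collecting a set of hit functions; B dedupes the adjusted addresses once, then sweeps the func_map a single time, letting each entry claim the not-yet-claimed addresses it contains (with early exit when none remain) and counting entries that claim something.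
-- outside the precondition, e.g. on calc_func_coverage_jucify([], {1: []}, True): A returns 0, B raises IndexError
import Mathlib
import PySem

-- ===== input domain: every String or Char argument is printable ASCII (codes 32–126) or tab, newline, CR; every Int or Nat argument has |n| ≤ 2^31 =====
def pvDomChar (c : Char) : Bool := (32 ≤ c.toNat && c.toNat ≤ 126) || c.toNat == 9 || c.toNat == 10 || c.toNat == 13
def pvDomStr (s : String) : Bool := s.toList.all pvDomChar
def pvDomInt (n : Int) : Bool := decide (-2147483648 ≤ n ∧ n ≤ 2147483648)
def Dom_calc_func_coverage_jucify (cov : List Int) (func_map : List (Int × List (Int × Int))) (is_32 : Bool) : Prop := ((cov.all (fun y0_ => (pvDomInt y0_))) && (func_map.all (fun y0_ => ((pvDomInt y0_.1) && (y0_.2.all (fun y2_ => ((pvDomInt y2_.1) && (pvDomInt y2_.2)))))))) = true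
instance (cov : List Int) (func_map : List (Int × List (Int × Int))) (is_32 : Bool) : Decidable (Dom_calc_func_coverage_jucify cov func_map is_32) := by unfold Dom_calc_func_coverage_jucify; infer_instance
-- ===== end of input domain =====

-- B replaces A's address-outer loop (full func_map rescan per address, set of hit
-- functions) by one sweep over func_map claiming deduped adjusted addresses; same cost
-- class, structurally different (objective: alternative).

-- ===== PORT A =====

-- the 'for func_entry, body_range in func_map.items()' loop of get_func
def pvGetFuncLoop (func_map : List (Int × List (Int × Int))) (adjusted : Int) : Option Int :=
  match func_map with
  | [] => none
  | (fe, br) :: rest =>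
    match br with
    | [] => none  -- Python raises IndexError at body_range[0]; excluded by Pre_
    | (low, high) :: _ =>
      if adjusted > low ∧ adjusted < high then some fe else pvGetFuncLoop rest adjusted

def pvGetFunc (func_map : List (Int × List (Int × Int))) (addr : Int) (is_32 : Bool) : Option Int :=
  let adjusted := addr - 4194304
  let adjusted := if is_32 then adjusted + 65536 else adjusted + 1048576
  pvGetFuncLoop func_map adjusted

def calc_func_coverage_jucify (cov : List Int) (func_map : List (Int × List (Int × Int))) (is_32 : Bool) : Int :=
  let covered_func : PySem.Set Int :=
    cov.foldl (fun s addr =>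
      match pvGetFunc func_map addr is_32 with
      | none => s
      | some f => PySem.Set.add s f) PySem.Set.empty
  PySem.Set.len covered_func

-- ===== PORT B =====

-- the 'for body_range in func_map.values()' sweep of B, with its early break
def pvClaimLoop (func_map : List (Int × List (Int × Int))) (count : Int) (remaining : List Int) : Int :=
  match func_map with
  | [] => count
  | (_, br) :: rest =>
    match br with
    | [] => pvClaimLoop rest count remaining  -- Python B raises IndexError here; excluded by Pre_
    | (low, high) :: _ =>
      let hit := remaining.filter (fun a => decide (low < a ∧ a < high))
      if hit ≠ [] then
        let remaining' := remaining.filter (fun a => !decide (low < a ∧ a < high))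
        if remaining' = [] then count + 1 else pvClaimLoop rest (count + 1) remaining'
      else pvClaimLoop rest count remaining

def calc_func_coverage_jucify_alt (cov : List Int) (func_map : List (Int × List (Int × Int))) (is_32 : Bool) : Int :=
  let base : Int := if is_32 then 65536 else 1048576
  let remaining : PySem.Set Int := PySem.Set.ofList (cov.map (fun addr => addr - 4194304 + base))
  pvClaimLoop func_map 0 remaining

-- ===== PRECONDITION & SPEC =====
-- Pre_ excludes func_maps containing an empty body-range list (A raises IndexError at
-- body_range[0] whenever the scan reaches such an entry, and B's single sweep always
-- reaches every entry and raises there) and, at the Lean level, association lists with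
-- duplicate keys, which do not represent a Python dict.
def Pre_calc_func_coverage_jucify (cov : List Int) (func_map : List (Int × List (Int × Int))) (is_32 : Bool) : Prop :=
  (∀ p ∈ func_map, p.2 ≠ []) ∧ (func_map.map Prod.fst).Nodup
instance (cov : List Int) (func_map : List (Int × List (Int × Int))) (is_32 : Bool) : Decidable (Pre_calc_func_coverage_jucify cov func_map is_32) := by unfold Pre_calc_func_coverage_jucify; infer_instance

def pvWitness_calc_func_coverage_jucify : List Int × (List (Int × List (Int × Int))) × Bool :=
  ([4194309, 4194310, 4194400], [(2, [(65540, 65550)]), (7, [(65300, 65400)])], true)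

def Spec_calc_func_coverage_jucify (cov : List Int) (func_map : List (Int × List (Int × Int))) (is_32 : Bool) (out : Int) : Prop := out = calc_func_coverage_jucify_alt cov func_map is_32
instance (cov : List Int) (func_map : List (Int × List (Int × Int))) (is_32 : Bool) (out : Int) : Decidable (Spec_calc_func_coverage_jucify cov func_map is_32 out) := by unfold Spec_calc_func_coverage_jucify; infer_instance

-- ===== CLAIM (what is proved, stated in full; the proofs are below) =====
def Claim_equal_calc_func_coverage_jucify : Prop := ∀ (cov : List Int) (func_map : List (Int × List (Int × Int))) (is_32 : Bool), Dom_calc_func_coverage_jucify cov func_map is_32 → Pre_calc_func_coverage_jucify cov func_map is_32 → Spec_calc_func_coverage_jucify cov func_map is_32 (calc_func_coverage_jucify cov func_map is_32)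

-- ===== LEMMAS AND PROOFS =====

-- A's accumulation loop is folding Set.add over the first-match values of cov
theorem pvFoldA_eq (fm : List (Int × List (Int × Int))) (is32 : Bool) (cov : List Int)
    (s : PySem.Set Int) :
    cov.foldl (fun s addr =>
      match pvGetFunc fm addr is32 with
      | none => s
      | some f => PySem.Set.add s f) s
    = (cov.filterMap (fun addr => pvGetFunc fm addr is32)).foldl PySem.Set.add s := by
  induction cov generalizing s with
  | nil => rfl
  | cons a t ih =>
      simp only [List.foldl_cons, List.filterMap_cons]
      cases h : pvGetFunc fm a is32 with
      | none => simp [ih]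
      | some f => simp [ih]

theorem pvGetFuncLoop_mem_keys (fm : List (Int × List (Int × Int))) (x v : Int)
    (h : pvGetFuncLoop fm x = some v) : v ∈ fm.map Prod.fst := by
  induction fm with
  | nil => simp [pvGetFuncLoop] at h
  | cons p rest ih =>
      obtain ⟨fe, br⟩ := p
      cases br with
      | nil => simp [pvGetFuncLoop] at h
      | cons lh t =>
          obtain ⟨low, high⟩ := lh
          simp only [pvGetFuncLoop] at h
          by_cases hc : x > low ∧ x < high
          · simp [hc] at h; simp [h]
          · simp [hc] at h; simp [ih h]

-- B's sweep counts, above c, the distinct first-match values of the remaining addresses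
theorem pvClaimLoop_eq (fm : List (Int × List (Int × Int)))
    (hne : ∀ p ∈ fm, p.2 ≠ []) (hnd : (fm.map Prod.fst).Nodup)
    (c : Int) (R : List Int) :
    pvClaimLoop fm c R = c + ((R.filterMap (fun x => pvGetFuncLoop fm x)).toFinset.card : Int) := by
  induction fm generalizing c R with
  | nil => simp [pvClaimLoop, pvGetFuncLoop]
  | cons p rest ih =>
      obtain ⟨fe, br⟩ := p
      have hbr : br ≠ [] := hne (fe, br) (by simp)
      have hne' : ∀ q ∈ rest, q.2 ≠ [] := fun q hq => hne q (by simp [hq])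
      have hnd' : (rest.map Prod.fst).Nodup := (List.nodup_cons.mp (by simpa using hnd)).2
      have hfe : fe ∉ rest.map Prod.fst := (List.nodup_cons.mp (by simpa using hnd)).1
      cases br with
      | nil => exact absurd rfl hbr
      | cons lh t =>
          obtain ⟨low, high⟩ := lh
          simp only [pvClaimLoop]
          by_cases hhit : R.filter (fun a => decide (low < a ∧ a < high)) ≠ []
          · -- some remaining address is inside (low, high)
            obtain ⟨a0, ha0⟩ := List.exists_mem_of_ne_nil _ hhit
            rw [List.mem_filter] at ha0
            have ha0R : a0 ∈ R := ha0.1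
            have ha0P : low < a0 ∧ a0 < high := by simpa using ha0.2
            set R' := R.filter (fun a => !decide (low < a ∧ a < high)) with hR'
            have hsplit :
                (R.filterMap (fun x => pvGetFuncLoop ((fe, (low, high) :: t) :: rest) x)).toFinset
                = insert fe (R'.filterMap (fun x => pvGetFuncLoop rest x)).toFinset := by
              ext v
              simp only [List.mem_toFinset, List.mem_filterMap, Finset.mem_insert, hR',
                List.mem_filter, pvGetFuncLoop]
              constructor
              · rintro ⟨x, hx, hv⟩
                by_cases hP : x > low ∧ x < high
                · simp [hP] at hv; exact Or.inl hv.symm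
                · simp [hP] at hv
                  exact Or.inr ⟨x, ⟨hx, by simp; omega⟩, hv⟩
              · rintro (rfl | ⟨x, ⟨hx, hxP⟩, hv⟩)
                · exact ⟨a0, ha0R, by simp [ha0P.1, ha0P.2, gt_iff_lt]⟩
                · refine ⟨x, hx, ?_⟩
                  have : ¬ (x > low ∧ x < high) := by simp at hxP; omega
                  simp [this, hv]
            have hnotmem : fe ∉ (R'.filterMap (fun x => pvGetFuncLoop rest x)).toFinset := by
              simp only [List.mem_toFinset, List.mem_filterMap]
              rintro ⟨x, _, hv⟩
              exact hfe (pvGetFuncLoop_mem_keys rest x fe hv)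
            rw [if_pos hhit, hsplit, Finset.card_insert_of_notMem hnotmem]
            by_cases hrem : R' = []
            · rw [if_pos hrem]
              simp [hrem]
            · rw [if_neg hrem, ih hne' hnd' (c + 1) R']
              push_cast
              ring
          · -- no remaining address is inside (low, high)
            rw [if_neg hhit]
            rw [not_not] at hhit
            have hall : ∀ x ∈ R, ¬ (low < x ∧ x < high) := by
              intro x hx hP
              have hmem : x ∈ R.filter (fun a => decide (low < a ∧ a < high)) := by
                rw [List.mem_filter]; exact ⟨hx, by simpa using hP⟩
              rw [hhit] at hmem; simp at hmem
            have hcongr :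
                R.filterMap (fun x => pvGetFuncLoop ((fe, (low, high) :: t) :: rest) x)
                = R.filterMap (fun x => pvGetFuncLoop rest x) := by
              apply List.filterMap_congr
              intro x hx
              have : ¬ (x > low ∧ x < high) := by
                have := hall x hx; omega
              simp [pvGetFuncLoop, this]
            rw [hcongr, ih hne' hnd' c R]

theorem pvLen_ofList_eq_card (xs : List Int) :
    ((PySem.Set.ofList xs).length : Int) = (xs.toFinset.card : Int) := by
  have h1 : (PySem.Set.ofList xs).toFinset.card = (PySem.Set.ofList xs).length :=
    List.toFinset_card_of_nodup (PySem.Set.nodup_ofList xs)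
  have h2 : (PySem.Set.ofList xs).toFinset = xs.toFinset := by
    ext v; simp [PySem.Set.mem_ofList]
  rw [← h1, h2]

-- ===== VERDICT (by name: the statement is the Claim_ definition above) =====
theorem calc_func_coverage_jucify_spec : Claim_equal_calc_func_coverage_jucify := by
  intro cov fm is32 _ hpre
  unfold Spec_calc_func_coverage_jucify calc_func_coverage_jucify calc_func_coverage_jucify_alt
  obtain ⟨hne, hnd⟩ := hpre
  rw [pvFoldA_eq, pvClaimLoop_eq fm hne hnd]
  have he : (PySem.Set.empty : PySem.Set Int) = ([] : List Int) := rfl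
  rw [he, ← PySem.Set.ofList_eq_foldl]
  have hsame :
      (((cov.map (fun addr => addr - 4194304 + if is32 = true then 65536 else 1048576) :
          List Int) |> PySem.Set.ofList).filterMap (fun x => pvGetFuncLoop fm x)).toFinset
      = (cov.filterMap (fun addr => pvGetFunc fm addr is32)).toFinset := by
    ext v
    simp only [List.mem_toFinset, List.mem_filterMap, PySem.Set.mem_ofList, List.mem_map,
      pvGetFunc]
    constructor
    · rintro ⟨x, ⟨addr, haddr, rfl⟩, hv⟩
      refine ⟨addr, haddr, ?_⟩
      cases is32 <;> simpa using hv
    · rintro ⟨addr, haddr, hv⟩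
      refine ⟨addr - 4194304 + if is32 = true then 65536 else 1048576, ⟨addr, haddr, rfl⟩, ?_⟩
      cases is32 <;> simpa using hv
  simp only [PySem.Set.len]
  rw [pvLen_ofList_eq_card, hsame]
  simp
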